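-- pv_equiv track=rewrite | github.com/sleepyzay/insomniac-model | rac ra - blender.py | read_bits
-- ===== SOURCE A (Python) =====
-- def read_bits(byte_list, num_bits):
-- 	results = []
-- 	result = 0
-- 	bit_count = 0
--
-- 	for byte in byte_list:
-- 		for i in range(7, -1, -1):
-- 			bit = (byte >> i) & 1
-- 			result = (result << 1) | bit
-- 			bit_count += 1
--
-- 			if bit_count == num_bits:
-- 				results.append(result)
-- 				result = 0
-- 				bit_count = 0
--
-- 	if bit_count > 0:
-- 		results.append(result)
--
-- 	return results
-- ===== SOURCE B (Python) =====
-- def read_bits(byte_list, num_bits):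
--     # pass 1: flatten all bytes into one MSB-first bit list
--     bits = [(byte >> i) & 1 for byte in byte_list for i in range(7, -1, -1)]
--     # pass 2: group the flat bit list into num_bits-wide chunks
--     results = []
--     for start in range(0, len(bits), num_bits):
--         value = 0
--         for bit in bits[start:start + num_bits]:
--             value = (value << 1) | bit
--         results.append(value)
--     return results
-- ===== Notes on version B (the rewrite author's own statement) =====
-- stated objective: alternative
-- what changed: A extracts bits and chunks them in one interleaved loop with a running (result, bit_count) state; B first materializes the whole flat bit list, then slices it into num_bits-wide groups with range(0, len, num_bits) and folds each slice; Pre_ excludes num_bits <= 0, where A's whole-stream-as-one-value result is an accident of its counter never firing and B's range step raises (0) or yields nothing (negative).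
-- outside the precondition, e.g. on read_bits([1], 0): A returns [1], B raises ValueError; on read_bits([1], -1): A returns [1], B returns []
import Mathlib
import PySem

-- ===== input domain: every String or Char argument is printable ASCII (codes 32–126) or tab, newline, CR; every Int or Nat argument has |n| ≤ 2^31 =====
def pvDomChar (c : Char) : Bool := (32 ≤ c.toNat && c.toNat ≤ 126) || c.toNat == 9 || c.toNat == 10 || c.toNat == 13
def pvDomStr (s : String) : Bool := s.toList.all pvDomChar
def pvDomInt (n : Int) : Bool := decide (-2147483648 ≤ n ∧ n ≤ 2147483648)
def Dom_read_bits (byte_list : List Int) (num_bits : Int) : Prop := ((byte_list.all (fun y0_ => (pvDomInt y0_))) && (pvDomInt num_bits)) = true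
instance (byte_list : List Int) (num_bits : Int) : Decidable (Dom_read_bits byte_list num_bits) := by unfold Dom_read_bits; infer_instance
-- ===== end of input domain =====

-- B replaces A's single interleaved extract-and-chunk loop by two passes: build the whole
-- flat bit list first, then slice it into num_bits-wide groups (objective: alternative decomposition).

-- ===== PORT A =====
def read_bits (byte_list : List Int) (num_bits : Int) : List Int :=
  let st := byte_list.foldl
    (fun (st : List Int × Int × Int) byte =>
      (PySem.List.pyRange 7 (-1) (-1)).foldl
        (fun (st : List Int × Int × Int) i =>
          -- '>>>' disambiguated to the Int-by-Nat shift instance (same operator)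
          let bit : Int := PySem.Int.band (@HShiftRight.hShiftRight Int Nat Int _ byte i.toNat) 1
          let result : Int := PySem.Int.bor (st.2.1 <<< 1) bit
          let bit_count : Int := st.2.2 + 1
          if bit_count = num_bits then (st.1 ++ [result], 0, 0)
          else (st.1, result, bit_count)) st)
    ([], 0, 0)
  if st.2.2 > 0 then st.1 ++ [st.2.1] else st.1

-- ===== PORT B =====
def read_bits_alt (byte_list : List Int) (num_bits : Int) : List Int :=
  let bits : List Int :=
    byte_list.flatMap (fun byte =>
      (PySem.List.pyRange 7 (-1) (-1)).map
        -- '>>>' disambiguated to the Int-by-Nat shift instance (same operator)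
        (fun i => PySem.Int.band (@HShiftRight.hShiftRight Int Nat Int _ byte i.toNat) 1))
  (PySem.List.pyRange 0 (bits.length : Int) num_bits).foldl
    (fun results start =>
      results ++ [(PySem.List.slice bits (some start) (some (start + num_bits))).foldl
        (fun value bit => PySem.Int.bor (value <<< 1) bit) 0])
    []

-- ===== PRECONDITION & SPEC =====
-- Pre_ excludes num_bits ≤ 0, on which A's value (all bits folded into one trailing int) is an
-- accident of its counter never firing; B's range step raises ValueError there (num_bits = 0) or
-- produces no chunks (num_bits < 0).
def Pre_read_bits (byte_list : List Int) (num_bits : Int) : Prop := 1 ≤ num_bits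
instance (byte_list : List Int) (num_bits : Int) : Decidable (Pre_read_bits byte_list num_bits) := by unfold Pre_read_bits; infer_instance
def pvWitness_read_bits : List Int × Int := ([5, 200], 3)
def Spec_read_bits (byte_list : List Int) (num_bits : Int) (out : List Int) : Prop := out = read_bits_alt byte_list num_bits
instance (byte_list : List Int) (num_bits : Int) (out : List Int) : Decidable (Spec_read_bits byte_list num_bits out) := by unfold Spec_read_bits; infer_instance

-- ===== CLAIM (what is proved, stated in full; the proofs are below) =====
def Claim_equal_read_bits : Prop := ∀ (byte_list : List Int) (num_bits : Int), Dom_read_bits byte_list num_bits → Pre_read_bits byte_list num_bits → Spec_read_bits byte_list num_bits (read_bits byte_list num_bits)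

-- ===== LEMMAS AND PROOFS =====

-- the bit-accumulation step (result << 1) | bit shared by both programs
def pvF (v b : Int) : Int := PySem.Int.bor (v <<< 1) b

-- A's loop body on one extracted bit
def pvStepA (num_bits : Int) (st : List Int × Int × Int) (bit : Int) : List Int × Int × Int :=
  let result : Int := PySem.Int.bor (st.2.1 <<< 1) bit
  let bit_count : Int := st.2.2 + 1
  if bit_count = num_bits then (st.1 ++ [result], 0, 0)
  else (st.1, result, bit_count)

-- A's trailing "if bit_count > 0: append"
def pvFinish (st : List Int × Int × Int) : List Int :=
  if st.2.2 > 0 then st.1 ++ [st.2.1] else st.1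

def pvBitsOf (byte : Int) : List Int :=
  (PySem.List.pyRange 7 (-1) (-1)).map
    (fun i => PySem.Int.band (@HShiftRight.hShiftRight Int Nat Int _ byte i.toNat) 1)

def pvBits (byte_list : List Int) : List Int := byte_list.flatMap pvBitsOf

-- A's remaining output given partial accumulator r holding c bits
def pvChunksA (nb : Int) : Int → Int → List Int → List Int
  | r, c, [] => if c > 0 then [r] else []
  | r, c, b :: bs =>
    if c + 1 = nb then pvF r b :: pvChunksA nb 0 0 bs
    else pvChunksA nb (pvF r b) (c + 1) bs

-- B's chunking of the flat bit list
def pvChunksB (s : Int) (bits : List Int) : List Int :=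
  if h : bits = [] ∨ s < 1 then []
  else (bits.take s.toNat).foldl pvF 0 :: pvChunksB s (bits.drop s.toNat)
termination_by bits.length
decreasing_by
  push_neg at h
  have h1 : bits.length ≠ 0 := by simpa [List.length_eq_zero_iff] using h.1
  have h2 : 1 ≤ s.toNat := by omega
  simp only [List.length_drop]
  omega

theorem pv_finish_foldl (nb : Int) (bits : List Int) : ∀ (rs : List Int) (r c : Int),
    pvFinish (bits.foldl (pvStepA nb) (rs, r, c)) = rs ++ pvChunksA nb r c bits := by
  induction bits with
  | nil =>
    intro rs r c
    simp only [List.foldl_nil, pvFinish, pvChunksA]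
    split <;> simp
  | cons b bs ih =>
    intro rs r c
    simp only [List.foldl_cons, pvChunksA, pvStepA, pvF]
    by_cases h : c + 1 = nb
    · simp only [if_pos h, ih]
      simp
    · simp only [if_neg h, ih]

theorem pv_chunksA_run (nb : Int) (hnb : 1 ≤ nb) (bits : List Int) : ∀ (r c : Int), 0 ≤ c → c < nb →
    pvChunksA nb r c bits =
      if (bits.length : Int) + c < nb then
        (if bits.length = 0 ∧ c = 0 then [] else [bits.foldl pvF r])
      else (bits.take (nb - c).toNat).foldl pvF r :: pvChunksA nb 0 0 (bits.drop (nb - c).toNat) := by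
  induction bits with
  | nil =>
    intro r c hc0 hc
    by_cases hcz : c = 0
    · subst hcz
      simp [pvChunksA, hc]
    · simp [pvChunksA, hc, hcz, show c > 0 by omega]
  | cons b bs ih =>
    intro r c hc0 hc
    simp only [pvChunksA, List.length_cons]
    by_cases h : c + 1 = nb
    · rw [if_pos h,
        if_neg (show ¬(((bs.length + 1 : Nat) : Int) + c < nb) by push_cast; omega),
        show (nb - c).toNat = 1 by omega]
      simp
    · rw [if_neg h, ih (pvF r b) (c + 1) (by omega) (by omega)]
      by_cases h2 : (bs.length : Int) + (c + 1) < nb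
      · rw [if_pos h2, if_neg (show ¬(bs.length = 0 ∧ c + 1 = 0) by omega),
          if_pos (show ((bs.length + 1 : Nat) : Int) + c < nb by push_cast; omega),
          if_neg (show ¬(bs.length + 1 = 0 ∧ c = 0) by omega)]
        simp
      · rw [if_neg h2,
          if_neg (show ¬(((bs.length + 1 : Nat) : Int) + c < nb) by push_cast; omega),
          show (nb - c).toNat = (nb - (c + 1)).toNat + 1 by omega]
        simp

theorem pv_chunksA_eq_chunksB (s : Int) : ∀ (n : Nat) (bits : List Int),
    bits.length ≤ n → 1 ≤ s → pvChunksA s 0 0 bits = pvChunksB s bits := by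
  intro n
  induction n with
  | zero =>
    intro bits hlen hs
    have hb : bits = [] := by
      rw [← List.length_eq_zero_iff]
      omega
    subst hb
    rw [pvChunksB]
    simp [pvChunksA]
  | succ n ih =>
    intro bits hlen hs
    by_cases hb : bits = []
    · subst hb
      rw [pvChunksB]
      simp [pvChunksA]
    · have hlen0 : bits.length ≠ 0 := by simpa [List.length_eq_zero_iff] using hb
      rw [pv_chunksA_run s hs bits 0 0 le_rfl (by omega)]
      rw [pvChunksB, dif_neg (show ¬(bits = [] ∨ s < 1) by push_neg; exact ⟨hb, by omega⟩)]
      by_cases h2 : (bits.length : Int) + 0 < s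
      · rw [if_pos h2, if_neg (show ¬(bits.length = 0 ∧ (0 : Int) = 0) by omega),
          List.take_of_length_le (by omega), List.drop_eq_nil_iff.mpr (by omega), pvChunksB]
        simp
      · rw [if_neg h2, show (s - 0).toNat = s.toNat by omega]
        congr 1
        exact ih (bits.drop s.toNat) (by simp only [List.length_drop]; omega) hs

theorem pv_pyRange_pos_eq_nil (a b s : Int) (hs : 0 < s) (h : b ≤ a) :
    PySem.List.pyRange a b s = [] := by
  rw [PySem.List.pyRange_of_pos a b hs, if_neg (by omega)]
  simp

theorem pv_pyRange_pos_cons (a b s : Int) (hs : 0 < s) (h : a < b) :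
    PySem.List.pyRange a b s = a :: PySem.List.pyRange (a + s) b s := by
  rw [PySem.List.pyRange_of_pos a b hs, PySem.List.pyRange_of_pos (a + s) b hs, if_pos h]
  by_cases h2 : a + s < b
  · rw [if_pos h2]
    have he : b - a + s - 1 = (b - a - 1) + 1 * s := by ring
    have hq : (b - a + s - 1) / s = (b - a - 1) / s + 1 := by
      rw [he, Int.add_mul_ediv_right _ _ (by omega)]
    have hq0 : 0 ≤ (b - a - 1) / s := Int.ediv_nonneg (by omega) (by omega)
    have he2 : b - (a + s) + s - 1 = b - a - 1 := by ring
    rw [he2, hq, show ((b - a - 1) / s + 1).toNat = ((b - a - 1) / s).toNat + 1 by omega]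
    rw [List.range_succ_eq_map]
    simp only [List.map_cons, List.map_map, Nat.cast_zero, mul_zero, add_zero]
    congr 1
    apply List.map_congr_left
    intro k _
    simp only [Function.comp_apply, Nat.succ_eq_add_one]
    push_cast
    ring
  · rw [if_neg h2]
    have h1 : 1 ≤ (b - a + s - 1) / s := (Int.le_ediv_iff_mul_le hs).mpr (by omega)
    have h2' : (b - a + s - 1) / s < 2 := (Int.ediv_lt_iff_lt_mul hs).mpr (by omega)
    rw [show ((b - a + s - 1) / s).toNat = 1 by omega]
    simp

theorem pv_foldl_push {α β : Type} (g : α → β) (l : List α) : ∀ (acc : List β),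
    l.foldl (fun rs x => rs ++ [g x]) acc = acc ++ l.map g := by
  induction l with
  | nil => intro acc; simp
  | cons x xs ih => intro acc; simp [ih]

theorem pv_map_slice_eq_chunksB (s : Int) (hs : 1 ≤ s) (bits : List Int) :
    ∀ (n : Nat) (a : Int), 0 ≤ a → bits.length - a.toNat ≤ n →
      (PySem.List.pyRange a (bits.length : Int) s).map
        (fun start => (PySem.List.slice bits (some start) (some (start + s))).foldl pvF 0)
      = pvChunksB s (bits.drop a.toNat) := by
  intro n
  induction n with
  | zero =>
    intro a ha hle
    have h1 : bits.length ≤ a.toNat := by omega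
    rw [pv_pyRange_pos_eq_nil a (bits.length : Int) s (by omega) (by omega)]
    rw [List.drop_eq_nil_iff.mpr h1, pvChunksB]
    simp
  | succ n ih =>
    intro a ha hle
    by_cases h : a < (bits.length : Int)
    · rw [pv_pyRange_pos_cons a (bits.length : Int) s (by omega) h]
      simp only [List.map_cons]
      rw [PySem.List.slice_toNat bits ha (by omega)]
      have hts : (a + s).toNat = a.toNat + s.toNat := by omega
      rw [hts, show a.toNat + s.toNat - a.toNat = s.toNat by omega]
      rw [pvChunksB, dif_neg (show ¬(bits.drop a.toNat = [] ∨ s < 1) by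
        push_neg
        constructor
        · rw [ne_eq, List.drop_eq_nil_iff]
          omega
        · omega)]
      congr 1
      rw [ih (a + s) (by omega) (by omega), List.drop_drop, hts]
    · rw [pv_pyRange_pos_eq_nil a (bits.length : Int) s (by omega) (by omega)]
      rw [List.drop_eq_nil_iff.mpr (by omega), pvChunksB]
      simp

theorem pv_A_char (byte_list : List Int) (num_bits : Int) :
    read_bits byte_list num_bits = pvFinish ((pvBits byte_list).foldl (pvStepA num_bits) ([], 0, 0)) := by
  simp only [read_bits, pvBits, pvBitsOf, pvFinish, pvStepA, List.foldl_flatMap, List.foldl_map]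

theorem pv_B_char (byte_list : List Int) (num_bits : Int) :
    read_bits_alt byte_list num_bits =
      (PySem.List.pyRange 0 ((pvBits byte_list).length : Int) num_bits).map
        (fun start => (PySem.List.slice (pvBits byte_list) (some start)
          (some (start + num_bits))).foldl pvF 0) := by
  have hF : (fun (value bit : Int) => PySem.Int.bor (value <<< 1) bit) = pvF := rfl
  have hB : (fun (byte : Int) => (PySem.List.pyRange 7 (-1) (-1)).map
      (fun i => PySem.Int.band (@HShiftRight.hShiftRight Int Nat Int _ byte i.toNat) 1)) = pvBitsOf := rfl
  simp only [read_bits_alt, pvBits, pv_foldl_push, List.nil_append, hF, hB]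

-- ===== VERDICT (by name: the statement is the Claim_ definition above) =====
theorem read_bits_spec : Claim_equal_read_bits := by
  intro byte_list num_bits _ hpre
  unfold Spec_read_bits
  rw [pv_A_char, pv_B_char, pv_finish_foldl]
  simp only [List.nil_append]
  rw [pv_chunksA_eq_chunksB num_bits (pvBits byte_list).length (pvBits byte_list) le_rfl hpre,
    pv_map_slice_eq_chunksB num_bits hpre (pvBits byte_list) (pvBits byte_list).length 0 le_rfl (by omega)]
  simp
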